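-- pv_equiv track=rewrite | github.com/park20011029/SSANMY | ssanmy/ssanmyApp/deal_crawler.py | del_brace_quasar
-- ===== SOURCE A (Python) =====
-- def del_brace_quasar(str):
--     is_brac = 0
--     str2 = ""
--     for i in range(len(str)):
--         if(str[i] == ']'):
--             is_brac = 1
--             continue
--         if(is_brac == 1):
--             str2 += str[i]
--     if(is_brac == 0):
--         return str
--     return str2
-- ===== SOURCE B (Python) =====
-- def del_brace_quasar(str):
--     if ']' not in str:
--         return str
--     return ''.join(str.split(']')[1:])
-- ===== Notes on version B (the rewrite author's own statement) =====
-- stated objective: simpler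
-- what changed: Replaces the flag-driven per-character accumulating loop by one split on the bracket delimiter and a join of all segments after the first.
import Mathlib
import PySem

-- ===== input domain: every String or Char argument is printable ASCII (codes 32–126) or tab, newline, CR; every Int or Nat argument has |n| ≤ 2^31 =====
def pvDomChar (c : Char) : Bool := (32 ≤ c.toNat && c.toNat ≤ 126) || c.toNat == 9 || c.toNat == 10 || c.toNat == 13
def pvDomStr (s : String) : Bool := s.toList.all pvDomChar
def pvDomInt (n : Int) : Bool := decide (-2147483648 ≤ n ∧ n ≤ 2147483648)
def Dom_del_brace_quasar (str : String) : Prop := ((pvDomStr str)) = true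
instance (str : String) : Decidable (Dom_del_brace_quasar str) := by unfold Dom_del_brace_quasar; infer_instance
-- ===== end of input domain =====

-- B replaces A's flag-driven character loop by split-on-']' and join of the segments after the first (simpler decomposition, same cost).


-- ===== PORT A =====
-- for i in range(len(str)) reads only str[i], so it is ported as a fold over the characters in order
def del_brace_quasar (str : String) : String :=
  let r := str.toList.foldl
    (fun (st : Bool × List Char) c =>
      if c = ']' then (true, st.2)
      else if st.1 then (st.1, st.2 ++ [c])
      else st)
    (false, [])
  if r.1 = false then str else String.mk r.2

-- ===== PORT B =====
def del_brace_quasar_alt (str : String) : String :=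
  if PySem.Str.isIn "]" str then
    String.mk (PySem.Chars.join [] ((PySem.Chars.splitOn str.toList [']']).drop 1))
  else str

-- ===== PRECONDITION & SPEC =====
def Spec_del_brace_quasar (str : String) (out : String) : Prop := out = del_brace_quasar_alt str
instance (str : String) (out : String) : Decidable (Spec_del_brace_quasar str out) := by unfold Spec_del_brace_quasar; infer_instance

-- ===== CLAIM (what is proved, stated in full; the proofs are below) =====
def Claim_equal_del_brace_quasar : Prop := ∀ (str : String), Dom_del_brace_quasar str → Spec_del_brace_quasar str (del_brace_quasar str)

-- ===== LEMMAS AND PROOFS =====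

-- structural model of splitting a char list on ']'
def splitC : List Char → List (List Char)
  | [] => [[]]
  | c :: r => if c = ']' then [] :: splitC r else (splitC r).modifyHead (c :: ·)

theorem splitC_ne_nil (l : List Char) : splitC l ≠ [] := by
  induction l with
  | nil => simp [splitC]
  | cons c r ih =>
    simp only [splitC]
    split_ifs
    · simp
    · obtain ⟨hd, tl, hsp⟩ := List.exists_cons_of_ne_nil ih
      simp [hsp, List.modifyHead]

theorem go_eq (fuel : Nat) (l cur : List Char) (acc : List (List Char))
    (h : l.length < fuel) :
    PySem.Chars.splitOn.go [']'] fuel l cur acc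
      = acc.reverse ++ (splitC l).modifyHead (cur.reverse ++ ·) := by
  induction fuel generalizing l cur acc with
  | zero => omega
  | succ f ih =>
    cases l with
    | nil => simp [PySem.Chars.splitOn.go, splitC]
    | cons c rest =>
      by_cases hc : c = ']'
      · subst hc
        have : List.isPrefixOf [']'] (']' :: rest) = true := by
          simp [List.isPrefixOf]
        rw [PySem.Chars.splitOn.go]
        simp only [this, if_pos]
        have hdrop : List.drop [']'].length (']' :: rest) = rest := rfl
        rw [hdrop, ih rest [] (cur.reverse :: acc) (by simpa using Nat.lt_of_succ_lt_succ h)]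
        obtain ⟨hd, tl, hsp⟩ := List.exists_cons_of_ne_nil (splitC_ne_nil rest)
        simp [splitC, List.modifyHead, hsp]
      · have : List.isPrefixOf [']'] (c :: rest) = false := by
          simp [List.isPrefixOf]
          intro hh; exact absurd hh.symm hc
        rw [PySem.Chars.splitOn.go]
        simp only [this, Bool.false_eq_true, if_false]
        rw [ih rest (c :: cur) acc (by simpa using Nat.lt_of_succ_lt_succ h)]
        obtain ⟨hd, tl, hsp⟩ := List.exists_cons_of_ne_nil (splitC_ne_nil rest)
        simp [splitC, hc, hsp, List.modifyHead]

theorem splitOn_eq_splitC (l : List Char) :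
    PySem.Chars.splitOn l [']'] = splitC l := by
  rw [PySem.Chars.splitOn, go_eq _ _ _ _ (by omega)]
  obtain ⟨hd, tl, hsp⟩ := List.exists_cons_of_ne_nil (splitC_ne_nil l)
  simp [hsp, List.modifyHead]

theorem flatten_splitC (l : List Char) :
    (splitC l).flatten = l.filter (fun c => !(c == ']')) := by
  induction l with
  | nil => simp [splitC]
  | cons c r ih =>
    by_cases hc : c = ']'
    · subst hc; simp [splitC, ih]
    · obtain ⟨hd, tl, hsp⟩ := List.exists_cons_of_ne_nil (splitC_ne_nil r)
      simp only [splitC, hc, if_false, hsp, List.modifyHead,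
        List.flatten_cons, List.filter_cons]
      simp only [hsp, List.flatten_cons] at ih
      simp [hc, ih]

theorem join_nil_eq_flatten (ls : List (List Char)) :
    PySem.Chars.join [] ls = ls.flatten := by
  induction ls with
  | nil => simp [PySem.Chars.join, List.intercalate]
  | cons h t ih =>
    cases t with
    | nil => simp [PySem.Chars.join, List.intercalate]
    | cons h2 t2 =>
      simp only [PySem.Chars.join, List.intercalate] at *
      simp [List.intersperse] at *
      simpa using ih

theorem join_drop_splitC (l : List Char) :
    PySem.Chars.join [] ((splitC l).drop 1)
      = ((l.dropWhile (fun c => !(c == ']'))).tail).filter (fun c => !(c == ']')) := by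
  induction l with
  | nil => simp [splitC, PySem.Chars.join, List.intercalate]
  | cons c r ih =>
    by_cases hc : c = ']'
    · subst hc
      rw [show splitC (']' :: r) = [] :: splitC r from by simp [splitC]]
      simp only [List.drop_succ_cons, List.drop_zero]
      rw [join_nil_eq_flatten, flatten_splitC]
      simp
    · obtain ⟨hd, tl, hsp⟩ := List.exists_cons_of_ne_nil (splitC_ne_nil r)
      simp only [splitC, hc, if_false, hsp, List.modifyHead,
        List.drop_succ_cons, List.drop_zero, List.dropWhile_cons]
      simp only [hsp, List.drop_succ_cons, List.drop_zero] at ih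
      simpa [hc] using ih

-- A's loop once the flag is set: it appends every non-']' character
theorem foldA_true (cs : List Char) (acc : List Char) :
    cs.foldl (fun (st : Bool × List Char) c =>
        if c = ']' then (true, st.2)
        else if st.1 then (st.1, st.2 ++ [c])
        else st) (true, acc)
      = (true, acc ++ cs.filter (fun c => !(c == ']'))) := by
  induction cs generalizing acc with
  | nil => simp
  | cons c r ih =>
    by_cases hc : c = ']'
    · subst hc; simp [ih]
    · simp [hc, ih]

-- A's loop from the initial state
theorem foldA_false (cs : List Char) (acc : List Char) :
    cs.foldl (fun (st : Bool × List Char) c =>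
        if c = ']' then (true, st.2)
        else if st.1 then (st.1, st.2 ++ [c])
        else st) (false, acc)
      = if ']' ∈ cs then
          (true, acc ++ ((cs.dropWhile (fun c => !(c == ']'))).tail).filter (fun c => !(c == ']')))
        else (false, acc) := by
  induction cs generalizing acc with
  | nil => simp
  | cons c r ih =>
    by_cases hc : c = ']'
    · subst hc
      simp [foldA_true]
    · have hc' : ¬ (']' = c) := fun h => hc h.symm
      simp [hc, hc', ih]

theorem isIn_iff_mem (l : List Char) :
    PySem.Chars.isIn [']'] l = true ↔ ']' ∈ l := by
  rw [PySem.Chars.isIn_iff_infix]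
  exact List.singleton_infix_iff ']' l

-- ===== VERDICT (by name: the statement is the Claim_ definition above) =====
theorem del_brace_quasar_spec : Claim_equal_del_brace_quasar := by
  intro str _
  unfold Spec_del_brace_quasar del_brace_quasar del_brace_quasar_alt
  rw [splitOn_eq_splitC, join_drop_splitC, foldA_false]
  by_cases hmem : ']' ∈ str.toList
  · have hin : PySem.Chars.isIn [']'] str.toList = true := (isIn_iff_mem _).mpr hmem
    simp [hmem, hin]
  · have hin : PySem.Chars.isIn [']'] str.toList = false :=
      Bool.eq_false_iff.mpr (fun h => hmem ((isIn_iff_mem _).mp h))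
    simp [hmem, hin]
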